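-- pv_equiv track=rewrite | github.com/peterlubiana/java-python-SQL | in2110-1b-peterrl.py | context_window
-- ===== SOURCE A (Python) =====
-- def context_window(sent, pos, size):
--     """Return context window for word at pos of given size."""
--
--     # Lag en ny liste over ord i konteksten som skal returneres.
--     contextList = [];
--
--     # lag en index variabel som sier hvor i setningen vi skal begynne å telle.
--     index = pos-size;
--
--     # Hvis indexen endte opp med å bli mindre enn null, må vi starte på null.
--     if index < 0 :
--         index = 0;
--
--     endIndex = len(sent) - 1;
--
--     # Tell igjennom listen frem til vi er kommet til pos+size som er ordet vi skal finne kontekst for pluss size-antall ord.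
--     while index <= pos+size and index <= endIndex :
--         # skip tokenen / ordet hvis det er det som vinduet gjelder for.
--         if index == pos :
--             index += 1;
--             continue;
--
--         contextList.append(sent[index]);
--         index += 1;
--
--     # Returner listen.
--     return contextList;
-- ===== SOURCE B (Python) =====
-- def context_window(sent, pos, size):
--     """Return context window for word at pos of given size."""
--     lo = pos - size
--     if lo < 0:
--         lo = 0
--     hi = pos + size
--     last = len(sent) - 1
--     if hi > last:
--         hi = last
--     if lo > hi:
--         return []
--     window = list(sent[lo:hi + 1])
--     if lo <= pos <= hi:
--         del window[pos - lo]
--     return window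
-- ===== Notes on version B (the rewrite author's own statement) =====
-- stated objective: simpler
-- what changed: Replaces the element-by-element while loop (with a continue to skip pos) by one contiguous slice copy of the clamped window followed by a single deletion of the focus word when it lies inside the window.
import Mathlib
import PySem

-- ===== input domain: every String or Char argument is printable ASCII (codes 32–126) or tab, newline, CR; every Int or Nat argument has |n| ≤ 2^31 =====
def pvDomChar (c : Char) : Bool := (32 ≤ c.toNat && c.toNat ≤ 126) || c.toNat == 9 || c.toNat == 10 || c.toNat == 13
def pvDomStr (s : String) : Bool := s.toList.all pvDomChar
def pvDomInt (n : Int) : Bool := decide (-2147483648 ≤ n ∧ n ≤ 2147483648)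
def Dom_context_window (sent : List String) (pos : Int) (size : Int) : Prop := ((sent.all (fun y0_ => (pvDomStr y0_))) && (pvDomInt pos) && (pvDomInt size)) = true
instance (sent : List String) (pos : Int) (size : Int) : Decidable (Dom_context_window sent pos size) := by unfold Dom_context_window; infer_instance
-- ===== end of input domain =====

-- B replaces A's element-by-element while loop with one contiguous slice copy plus a single deletion of the focus word (simpler decomposition; return value only).


-- ===== PORT A =====
-- while index <= pos+size and index <= endIndex: skip pos, append sent[index]
-- sent[index] is ported as pyGetD: the loop keeps 0 ≤ index ≤ endIndex = len-1, so IndexError is unreachable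
def cwLoop (sent : List String) (pos : Int) (stop : Int) (endIndex : Int)
    (index : Int) (acc : List String) : List String :=
  if _h : index ≤ stop ∧ index ≤ endIndex then
    if index = pos then
      cwLoop sent pos stop endIndex (index + 1) acc
    else
      cwLoop sent pos stop endIndex (index + 1) (acc ++ [PySem.List.pyGetD sent index ""])
  else acc
termination_by (min stop endIndex + 1 - index).toNat
decreasing_by all_goals omega

def context_window (sent : List String) (pos : Int) (size : Int) : List String :=
  let index0 := pos - size
  let index1 := if index0 < 0 then 0 else index0
  let endIndex := (sent.length : Int) - 1
  cwLoop sent pos (pos + size) endIndex index1 []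

-- ===== PORT B =====
def context_window_alt (sent : List String) (pos : Int) (size : Int) : List String :=
  let lo0 := pos - size
  let lo := if lo0 < 0 then 0 else lo0
  let hi0 := pos + size
  let last := (sent.length : Int) - 1
  let hi := if hi0 > last then last else hi0
  if lo > hi then []
  else
    -- window = list(sent[lo:hi+1]); del window[pos-lo] when lo ≤ pos ≤ hi (index is in range, so no IndexError)
    let window := PySem.List.slice sent (some lo) (some (hi + 1))
    if lo ≤ pos ∧ pos ≤ hi then window.eraseIdx (pos - lo).toNat else window

-- ===== PRECONDITION & SPEC =====
def Spec_context_window (sent : List String) (pos : Int) (size : Int) (out : List String) : Prop := out = context_window_alt sent pos size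
instance (sent : List String) (pos : Int) (size : Int) (out : List String) : Decidable (Spec_context_window sent pos size out) := by unfold Spec_context_window; infer_instance

-- ===== CLAIM (what is proved, stated in full; the proofs are below) =====
def Claim_equal_context_window : Prop := ∀ (sent : List String) (pos : Int) (size : Int), Dom_context_window sent pos size → Spec_context_window sent pos size (context_window sent pos size)

-- ===== LEMMAS AND PROOFS =====

-- the contiguous window from index i up to M (inclusive), as drop/take
def cwWin (sent : List String) (M : Int) (i : Int) : List String :=
  (sent.drop i.toNat).take ((M + 1).toNat - i.toNat)

lemma cwWin_empty (sent : List String) (M i : Int) (h : M < i) (hi : 0 ≤ i) :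
    cwWin sent M i = [] := by
  unfold cwWin
  have : (M + 1).toNat - i.toNat = 0 := by omega
  simp [this]

lemma cwWin_step (sent : List String) (M i : Int) (h0 : 0 ≤ i) (hM : i ≤ M)
    (hlen : M ≤ (sent.length : Int) - 1) :
    cwWin sent M i = sent[i.toNat]'(by omega) :: cwWin sent M (i + 1) := by
  unfold cwWin
  have hlt : i.toNat < sent.length := by omega
  rw [List.drop_eq_getElem_cons hlt]
  have h1 : (M + 1).toNat - i.toNat = ((M + 1).toNat - (i + 1).toNat) + 1 := by omega
  have h2 : i.toNat + 1 = (i + 1).toNat := by omega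
  rw [h1, List.take_succ_cons, h2]

lemma cwLoop_char (sent : List String) (pos stop e : Int)
    (he : e = (sent.length : Int) - 1) :
    ∀ (k : Nat) (i : Int) (acc : List String), 0 ≤ i →
      (min stop e + 1 - i).toNat ≤ k →
      cwLoop sent pos stop e i acc =
        acc ++ (if pos < i ∨ min stop e < pos
                then cwWin sent (min stop e) i
                else (cwWin sent (min stop e) i).eraseIdx (pos - i).toNat) := by
  intro k
  induction k with
  | zero =>
      intro i acc h0 hk
      have hgt : min stop e < i := by omega
      rw [cwLoop]
      rw [dif_neg (by omega)]
      rw [cwWin_empty sent _ i hgt h0]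
      split <;> simp
  | succ k ih =>
      intro i acc h0 hk
      by_cases hc : i ≤ stop ∧ i ≤ e
      · have hiM : i ≤ min stop e := by omega
        have hMlen : min stop e ≤ (sent.length : Int) - 1 := by omega
        rw [cwLoop, dif_pos hc]
        by_cases hp : i = pos
        · rw [if_pos hp]
          rw [ih (i + 1) acc (by omega) (by omega)]
          have hnot : ¬ (pos < i ∨ min stop e < pos) := by omega
          rw [if_neg hnot, if_pos (by omega : pos < i + 1 ∨ min stop e < pos)]
          rw [cwWin_step sent _ i h0 hiM hMlen]
          have : (pos - i).toNat = 0 := by omega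
          simp [this]
        · rw [if_neg hp]
          rw [ih (i + 1) _ (by omega) (by omega)]
          have hget : PySem.List.pyGetD sent i "" = sent[i.toNat]'(by omega) := by
            rw [PySem.List.pyGetD_eq_getElem sent "" h0 (by exact_mod_cast by omega)]
          rw [cwWin_step sent _ i h0 hiM hMlen, List.append_assoc]
          by_cases hlt : pos < i ∨ min stop e < pos
          · rw [if_pos hlt, if_pos (by omega : pos < i + 1 ∨ min stop e < pos)]
            simp [hget]
          · rw [if_neg hlt, if_neg (by omega : ¬ (pos < i + 1 ∨ min stop e < pos))]
            have harith : (pos - i).toNat = (pos - (i + 1)).toNat + 1 := by omega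
            rw [harith, List.eraseIdx_cons_succ]
            simp [hget]
      · rw [cwLoop, dif_neg hc]
        have hgt : min stop e < i := by omega
        rw [cwWin_empty sent _ i hgt h0]
        split <;> simp

-- ===== VERDICT (by name: the statement is the Claim_ definition above) =====
theorem context_window_spec : Claim_equal_context_window := by
  unfold Claim_equal_context_window
  intro sent pos size _
  unfold Spec_context_window context_window context_window_alt
  simp only []
  set n : Int := (sent.length : Int) with hn
  set lo : Int := if pos - size < 0 then 0 else pos - size with hlo
  set hi : Int := if pos + size > n - 1 then n - 1 else pos + size with hhi
  have hlo0 : 0 ≤ lo := by rw [hlo]; split <;> omega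
  have hMeq : min (pos + size) (n - 1) = hi := by rw [hhi]; split <;> omega
  rw [cwLoop_char sent pos (pos + size) (n - 1) rfl
      ((min (pos + size) (n - 1) + 1 - lo).toNat) lo [] hlo0 le_rfl]
  rw [hMeq]
  by_cases hgt : lo > hi
  · rw [if_pos hgt, cwWin_empty sent hi lo (by omega) hlo0]
    split <;> simp
  · have hslice : PySem.List.slice sent (some lo) (some (hi + 1)) = cwWin sent hi lo := by
      rw [PySem.List.slice_toNat sent hlo0 (by omega)]; rfl
    rw [if_neg hgt, hslice]
    by_cases hin : lo ≤ pos ∧ pos ≤ hi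
    · rw [if_pos hin, if_neg (by omega : ¬ (pos < lo ∨ hi < pos)), List.nil_append]
    · rw [if_neg hin, if_pos (by omega : pos < lo ∨ hi < pos), List.nil_append]
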